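-- pv_equiv track=rewrite | github.com/SzymonIwaniuk/wdi-2024-2025 | Zestaw3/zad111.py | wierze
-- ===== SOURCE A (Python) =====
-- def summ(T,n,i,j,k,l):
--     sum1 = sum2 = 0
--
--     for x in range(n):
--         if x != j:
--             sum1 += T[i][x]
--         if x != i:
--             sum1 += T[x][j]
--         if x != l:
--             sum2 += T[k][x]
--         if x != k:
--             sum2 += T[x][l]
--
--     if i == k:
--         for x in range(n):
--             if x != j and x != l:
--                 sum2 -= T[i][x]
--     if j == l:
--         for x in range(n):
--             if x != i and x != k:
--                 sum2 -= T[x][j]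
--
--     return sum1 + sum2
--
-- def wierze(T):
--     n = len(T)
--     pozycja = None
--     maxi = 0
--
--     for i in range(n):
--         for j in range(n):
--             for k in range(n):
--                 for l in range(n):
--                     if (k, l) != (i, j):
--                         currsum = summ(T, n, i, j, k, l)
--                         if currsum > maxi:
--                             maxi = currsum
--                             pozycja = (i, j), (k, l)
--
--     return pozycja, maxi
-- ===== SOURCE B (Python) =====
-- def wierze(T):
--     n = len(T)
--     if n < 2:
--         return None, 0
--     R = [sum(T[i][x] for x in range(n)) for i in range(n)]
--     C = [sum(T[x][j] for x in range(n)) for j in range(n)]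
--     pozycja = None
--     maxi = 0
--     for i in range(n):
--         for j in range(n):
--             fij = R[i] + C[j] - 2 * T[i][j]
--             for k in range(n):
--                 for l in range(n):
--                     if (k, l) != (i, j):
--                         cur = fij + R[k] + C[l] - 2 * T[k][l]
--                         if i == k:
--                             cur -= R[i] - T[i][j] - T[i][l]
--                         if j == l:
--                             cur -= C[j] - T[i][j] - T[k][j]
--                         if cur > maxi:
--                             maxi = cur
--                             pozycja = (i, j), (k, l)
--     return pozycja, maxi
-- ===== Notes on version B (the rewrite author's own statement) =====
-- stated objective: faster
-- what changed: Row sums R and column sums C are precomputed once, so the inner helper summ (two O(n) scans per quadruple) is replaced by a constant-time closed formula f(i,j)+f(k,l) minus shared-row/column corrections.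
import Mathlib
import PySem

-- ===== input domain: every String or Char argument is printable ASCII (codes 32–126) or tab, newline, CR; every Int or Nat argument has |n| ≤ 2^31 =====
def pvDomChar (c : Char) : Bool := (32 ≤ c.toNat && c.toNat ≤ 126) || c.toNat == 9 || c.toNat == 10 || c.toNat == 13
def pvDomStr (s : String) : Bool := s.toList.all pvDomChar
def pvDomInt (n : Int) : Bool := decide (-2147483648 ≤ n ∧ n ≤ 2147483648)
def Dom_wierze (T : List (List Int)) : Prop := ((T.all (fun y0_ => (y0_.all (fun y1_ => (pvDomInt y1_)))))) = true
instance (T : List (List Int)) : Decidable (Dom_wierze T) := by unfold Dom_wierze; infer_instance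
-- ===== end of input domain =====

-- B precomputes row/column sums once and replaces A's O(n) helper summ by a closed formula per quadruple: O(n^4) instead of O(n^5); same result.

-- shared indexing helper: T[i][x] (in-range on every input admitted by Pre_wierze)
def gget (T : List (List Int)) (i x : Nat) : Int := (T.getD i []).getD x 0

-- ===== PORT A =====
-- literal port of summ: one combined pass accumulating (sum1, sum2), then the two correction passes
def summA (T : List (List Int)) (n i j k l : Nat) : Int :=
  let p := (List.range n).foldl
    (fun (p : Int × Int) x =>
      (p.1 + (if x ≠ j then gget T i x else 0) + (if x ≠ i then gget T x j else 0),
       p.2 + (if x ≠ l then gget T k x else 0) + (if x ≠ k then gget T x l else 0)))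
    (0, 0)
  let s2a := if i = k then (List.range n).foldl (fun s x => if x ≠ j ∧ x ≠ l then s - gget T i x else s) p.2 else p.2
  let s2b := if j = l then (List.range n).foldl (fun s x => if x ≠ i ∧ x ≠ k then s - gget T x j else s) s2a else s2a
  p.1 + s2b

def wierze (T : List (List Int)) : (Option ((Int × Int) × (Int × Int))) × Int :=
  let n := T.length
  (List.range n).foldl (fun st i =>
    (List.range n).foldl (fun st j =>
      (List.range n).foldl (fun st k =>
        (List.range n).foldl (fun st l =>
          if (k, l) ≠ (i, j) then
            let currsum := summA T n i j k l
            if currsum > st.2 then (some (((i : Int), (j : Int)), ((k : Int), (l : Int))), currsum) else st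
          else st) st) st) st)
    ((none : Option ((Int × Int) × (Int × Int))), (0 : Int))

-- ===== PORT B =====
def wierze_alt (T : List (List Int)) : (Option ((Int × Int) × (Int × Int))) × Int :=
  let n := T.length
  if n < 2 then (none, 0) else
  let R := (List.range n).map (fun i => (List.range n).foldl (fun s x => s + gget T i x) 0)
  let C := (List.range n).map (fun j => (List.range n).foldl (fun s x => s + gget T x j) 0)
  (List.range n).foldl (fun st i =>
    (List.range n).foldl (fun st j =>
      let fij := R.getD i 0 + C.getD j 0 - 2 * gget T i j
      (List.range n).foldl (fun st k =>
        (List.range n).foldl (fun st l =>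
          if (k, l) ≠ (i, j) then
            let cur := fij + R.getD k 0 + C.getD l 0 - 2 * gget T k l
            let cur := if i = k then cur - (R.getD i 0 - gget T i j - gget T i l) else cur
            let cur := if j = l then cur - (C.getD j 0 - gget T i j - gget T k j) else cur
            if cur > st.2 then (some (((i : Int), (j : Int)), ((k : Int), (l : Int))), cur) else st
          else st) st) st) st)
    ((none : Option ((Int × Int) × (Int × Int))), (0 : Int))

-- ===== PRECONDITION & SPEC =====
-- Pre_ excludes exactly the ragged inputs on which Python A raises IndexError
-- (for n ≥ 2 every row is indexed up to n-1; for n ≤ 1 no cell is ever read).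
def Pre_wierze (T : List (List Int)) : Prop :=
  T.length ≤ 1 ∨ ∀ r ∈ T, T.length ≤ r.length
instance (T : List (List Int)) : Decidable (Pre_wierze T) := by unfold Pre_wierze; infer_instance

def pvWitness_wierze : List (List Int) := [[1, 2], [3, 4]]

def Spec_wierze (T : List (List Int)) (out : (Option ((Int × Int) × (Int × Int))) × Int) : Prop := out = wierze_alt T
instance (T : List (List Int)) (out : (Option ((Int × Int) × (Int × Int))) × Int) : Decidable (Spec_wierze T out) := by unfold Spec_wierze; infer_instance

-- ===== CLAIM (what is proved, stated in full; the proofs are below) =====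
def Claim_equal_wierze : Prop := ∀ (T : List (List Int)), Dom_wierze T → Pre_wierze T → Spec_wierze T (wierze T)

-- ===== LEMMAS AND PROOFS =====

theorem foldl_range_pair2 (f f' g g' : Nat → Int) (n : Nat) (a b : Int) :
    (List.range n).foldl (fun (p : Int × Int) x => (p.1 + f x + f' x, p.2 + g x + g' x)) (a, b)
      = (a + ∑ x ∈ Finset.range n, (f x + f' x), b + ∑ x ∈ Finset.range n, (g x + g' x)) := by
  induction n generalizing a b with
  | zero => simp
  | succ m ih =>
    simp only [List.range_succ, List.foldl_append, List.foldl_cons, List.foldl_nil,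
      Finset.sum_range_succ, ih]
    exact Prod.ext (by ring) (by ring)

theorem foldl_range_add (g : Nat → Int) (n : Nat) (a : Int) :
    (List.range n).foldl (fun s x => s + g x) a = a + ∑ x ∈ Finset.range n, g x := by
  induction n generalizing a with
  | zero => simp
  | succ m ih =>
    simp only [List.range_succ, List.foldl_append, List.foldl_cons, List.foldl_nil,
      Finset.sum_range_succ, ih]
    ring

theorem foldl_range_sub (g : Nat → Int) (P : Nat → Prop) [DecidablePred P] (n : Nat) (a : Int) :
    (List.range n).foldl (fun s x => if P x then s - g x else s) a
      = a - ∑ x ∈ Finset.range n, (if P x then g x else 0) := by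
  induction n generalizing a with
  | zero => simp
  | succ m ih =>
    simp only [List.range_succ, List.foldl_append, List.foldl_cons, List.foldl_nil,
      Finset.sum_range_succ, ih]
    split_ifs <;> ring

theorem sum_range_erase_one (g : Nat → Int) (n j : Nat) (hj : j < n) :
    ∑ x ∈ Finset.range n, (if x ≠ j then g x else 0)
      = (∑ x ∈ Finset.range n, g x) - g j := by
  have h : ∀ x ∈ Finset.range n, g x = (if x ≠ j then g x else 0) + (if x = j then g x else 0) := by
    intro x _; by_cases hx : x = j <;> simp [hx]
  rw [Finset.sum_congr rfl h, Finset.sum_add_distrib,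
    Finset.sum_ite_eq' (Finset.range n) j g]
  simp [Finset.mem_range.mpr hj]

theorem sum_range_erase_two (g : Nat → Int) (n j l : Nat) (hj : j < n) (hl : l < n) (hjl : j ≠ l) :
    ∑ x ∈ Finset.range n, (if x ≠ j ∧ x ≠ l then g x else 0)
      = (∑ x ∈ Finset.range n, g x) - g j - g l := by
  have h : ∀ x ∈ Finset.range n, g x
      = (if x ≠ j ∧ x ≠ l then g x else 0) + (if x = j then g x else 0) + (if x = l then g x else 0) := by
    intro x _
    by_cases hx : x = j
    · subst hx; simp [hjl]
    · by_cases hx' : x = l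
      · subst hx'; simp [hx]
      · simp [hx, hx']
  rw [Finset.sum_congr rfl h, Finset.sum_add_distrib, Finset.sum_add_distrib,
    Finset.sum_ite_eq' (Finset.range n) j g, Finset.sum_ite_eq' (Finset.range n) l g]
  simp [Finset.mem_range.mpr hj, Finset.mem_range.mpr hl]
  ring

def rowS (T : List (List Int)) (n i : Nat) : Int := ∑ x ∈ Finset.range n, gget T i x
def colS (T : List (List Int)) (n j : Nat) : Int := ∑ x ∈ Finset.range n, gget T x j

theorem summA_closed (T : List (List Int)) (n i j k l : Nat)
    (hi : i < n) (hj : j < n) (hk : k < n) (hl : l < n) (hne : ¬(k = i ∧ l = j)) :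
    summA T n i j k l
      = (if j = l then
          (if i = k then
            rowS T n i + colS T n j - 2 * gget T i j + rowS T n k + colS T n l - 2 * gget T k l
              - (rowS T n i - gget T i j - gget T i l)
          else
            rowS T n i + colS T n j - 2 * gget T i j + rowS T n k + colS T n l - 2 * gget T k l)
            - (colS T n j - gget T i j - gget T k j)
        else
          if i = k then
            rowS T n i + colS T n j - 2 * gget T i j + rowS T n k + colS T n l - 2 * gget T k l
              - (rowS T n i - gget T i j - gget T i l)
          else
            rowS T n i + colS T n j - 2 * gget T i j + rowS T n k + colS T n l - 2 * gget T k l) := by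
  unfold summA
  dsimp only
  rw [foldl_range_pair2 (fun x => if x ≠ j then gget T i x else 0)
      (fun x => if x ≠ i then gget T x j else 0)
      (fun x => if x ≠ l then gget T k x else 0)
      (fun x => if x ≠ k then gget T x l else 0)]
  dsimp only
  simp only [Finset.sum_add_distrib]
  rw [sum_range_erase_one (fun x => gget T i x) n j hj,
      sum_range_erase_one (fun x => gget T x j) n i hi,
      sum_range_erase_one (fun x => gget T k x) n l hl,
      sum_range_erase_one (fun x => gget T x l) n k hk,
      foldl_range_sub (fun x => gget T i x) (fun x => x ≠ j ∧ x ≠ l) n,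
      foldl_range_sub (fun x => gget T x j) (fun x => x ≠ i ∧ x ≠ k) n]
  simp only [rowS, colS]
  by_cases h1 : i = k
  · have h2 : ¬ j = l := fun h => hne ⟨h1.symm, h.symm⟩
    rw [sum_range_erase_two (fun x => gget T i x) n j l hj hl h2]
    simp only [if_pos h1, if_neg h2]
    ring
  · by_cases h2 : j = l
    · rw [sum_range_erase_two (fun x => gget T x j) n i k hi hk (fun h => h1 h)]
      simp only [if_pos h2, if_neg h1]
      ring
    · simp only [if_neg h1, if_neg h2]
      ring

theorem foldl_congr_mem' {α β : Type} (l : List α) (f g : β → α → β) (init : β)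
    (h : ∀ b a, a ∈ l → f b a = g b a) : l.foldl f init = l.foldl g init := by
  induction l generalizing init with
  | nil => rfl
  | cons x xs ih =>
    simp only [List.foldl_cons]
    rw [h init x (List.mem_cons_self)]
    exact ih _ (fun b a ha => h b a (List.mem_cons_of_mem _ ha))

theorem Rget (T : List (List Int)) (n i : Nat) (hi : i < n) :
    ((List.range n).map (fun i => (List.range n).foldl (fun s x => s + gget T i x) 0)).getD i 0
      = rowS T n i := by
  rw [List.getD_eq_getElem?_getD, List.getElem?_map]
  simp [List.getElem?_range hi, foldl_range_add, rowS]

theorem Cget (T : List (List Int)) (n j : Nat) (hj : j < n) :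
    ((List.range n).map (fun j => (List.range n).foldl (fun s x => s + gget T x j) 0)).getD j 0
      = colS T n j := by
  rw [List.getD_eq_getElem?_getD, List.getElem?_map]
  simp [List.getElem?_range hj, foldl_range_add, colS]

-- ===== VERDICT (by name: the statement is the Claim_ definition above) =====
theorem wierze_spec : Claim_equal_wierze := by
  intro T _ _
  unfold Spec_wierze wierze wierze_alt
  dsimp only
  by_cases hT : T.length < 2
  · rw [if_pos hT]
    have h01 : T.length = 0 ∨ T.length = 1 := by omega
    rcases h01 with h | h <;> rw [h] <;> simp [List.range_succ]
  rw [if_neg hT]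
  apply foldl_congr_mem'
  intro st i hi
  apply foldl_congr_mem'
  intro st j hj
  apply foldl_congr_mem'
  intro st k hk
  apply foldl_congr_mem'
  intro st l hl
  rw [List.mem_range] at hi hj hk hl
  by_cases hne : (k, l) = (i, j)
  · simp [hne]
  · have hne' : ¬(k = i ∧ l = j) := by
      intro ⟨h1, h2⟩; exact hne (by rw [h1, h2])
    rw [if_pos hne, if_pos hne]
    rw [summA_closed T T.length i j k l hi hj hk hl hne',
        Rget T T.length i hi, Cget T T.length j hj,
        Rget T T.length k hk, Cget T T.length l hl]
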